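-- pv_equiv track=rewrite | github.com/jramaswami/Advent-Of-Code-2019 | 22/python/puzzle22.py | reverse_shuffle
-- ===== SOURCE A (Python) =====
-- def modinv(n, m):
--     """Modular inverse assuming m is prime."""
--     return pow(n, m-2, m)
--
-- def reverse_cut(n, deck_length, keep):
--     """Cut in reverse."""
--     return (keep + n + deck_length) % deck_length
--
-- def reverse_deal_with(n, deck_length, keep):
--     """Deal with in reverse"""
--     m = modinv(n, deck_length)
--     return (m * keep) % deck_length
--
-- def reverse_deal_into(deck_length, keep):
--     """Reverse deal into"""
--     return deck_length - 1 - keep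
--
-- def reverse_shuffle(lines, keep, deck_length):
--     """Do the shuffle in reverse."""
--     for line in lines[::-1]:
--         tokens = line.split()
--         if tokens[0] == 'cut':
--             n = int(tokens[1])
--             keep = reverse_cut(n, deck_length, keep)
--         elif tokens[1] == 'into':
--             keep = reverse_deal_into(deck_length, keep)
--         elif tokens[1] == 'with':
--             n = int(tokens[3])
--             keep = reverse_deal_with(n, deck_length, keep)
--     return keep
-- ===== SOURCE B (Python) =====
-- def reverse_shuffle(lines, keep, deck_length):
--     """Undo the shuffle by recursing on the list: later lines are undone by the
--     recursive call first, then this line's operation is undone directly."""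
--     if not lines:
--         return keep
--     pos = reverse_shuffle(lines[1:], keep, deck_length)
--     tokens = lines[0].split()
--     if tokens[1] == 'into':
--         return deck_length - 1 - pos
--     if tokens[1] == 'with':
--         return (pow(int(tokens[3]), deck_length - 2, deck_length) * pos) % deck_length
--     if tokens[0] == 'cut':
--         return (pos + int(tokens[1]) + deck_length) % deck_length
--     return pos
-- ===== Notes on version B (the rewrite author's own statement) =====
-- stated objective: alternative
-- what changed: B replaces A's loop over lines[::-1] with structural recursion on the list (the recursive call undoes the later lines first), inlines modinv and the three helper functions into direct arithmetic, and dispatches on tokens[1] ('into'/'with') first with the 'cut' test as the fallback.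
-- outside the precondition, e.g. on reverse_shuffle(['deal with increment 3'], 1, -5): A returns -2, B returns -2
import Mathlib
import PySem

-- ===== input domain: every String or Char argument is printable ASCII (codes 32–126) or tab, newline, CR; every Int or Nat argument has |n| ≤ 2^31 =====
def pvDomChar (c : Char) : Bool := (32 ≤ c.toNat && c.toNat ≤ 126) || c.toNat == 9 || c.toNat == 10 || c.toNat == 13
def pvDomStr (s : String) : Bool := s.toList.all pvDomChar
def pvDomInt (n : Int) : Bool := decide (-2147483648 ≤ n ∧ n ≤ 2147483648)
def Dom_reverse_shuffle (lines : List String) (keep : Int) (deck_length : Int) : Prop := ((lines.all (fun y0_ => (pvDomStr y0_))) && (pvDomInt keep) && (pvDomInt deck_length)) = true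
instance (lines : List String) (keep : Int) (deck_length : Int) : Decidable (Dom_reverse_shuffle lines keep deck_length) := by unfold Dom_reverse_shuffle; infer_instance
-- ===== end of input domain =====

-- B undoes the shuffle by structural recursion on the lines (later lines undone by the
-- recursive call first) with the helpers inlined and the token dispatch reordered,
-- replacing A's loop over the reversed list; exact same return value on Pre_.


-- ===== PORT A =====
-- modinv(n, m) = pow(n, m-2, m); the .toNat is exact on Pre_ (1 ≤ m: for m ≥ 2 the exponent
-- m-2 is ≥ 0, and for m = 1 Python's pow(n, -1, 1) = 0 = powMod n 0 1)
def pv_modinv (n : Int) (m : Int) : Int := PySem.Int.powMod n (m - 2).toNat m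

def pv_reverse_cut (n : Int) (deck_length : Int) (keep : Int) : Int :=
  PySem.Int.mod (keep + n + deck_length) deck_length

def pv_reverse_deal_with (n : Int) (deck_length : Int) (keep : Int) : Int :=
  PySem.Int.mod (pv_modinv n deck_length * keep) deck_length

def pv_reverse_deal_into (deck_length : Int) (keep : Int) : Int :=
  deck_length - 1 - keep

-- the body of A's loop; tokens[i] and int(tokens[i]) are total with defaults, exact on Pre_
def pvStepA (deck_length : Int) (keep : Int) (line : String) : Int :=
  let tokens := PySem.Str.split₀ line
  if PySem.List.pyGetD tokens 0 "" = "cut" then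
    let n := (PySem.Int.ofStr? (PySem.List.pyGetD tokens 1 "")).getD 0
    pv_reverse_cut n deck_length keep
  else if PySem.List.pyGetD tokens 1 "" = "into" then
    pv_reverse_deal_into deck_length keep
  else if PySem.List.pyGetD tokens 1 "" = "with" then
    let n := (PySem.Int.ofStr? (PySem.List.pyGetD tokens 3 "")).getD 0
    pv_reverse_deal_with n deck_length keep
  else keep

def reverse_shuffle (lines : List String) (keep : Int) (deck_length : Int) : Int :=
  ((PySem.List.slice? lines none none (-1)).getD []).foldl (pvStepA deck_length) keep

-- ===== PORT B =====
-- literal transliteration of Source B: recursion on the list, inlined arithmetic,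
-- dispatch on tokens[1] first with the 'cut' test last
def reverse_shuffle_alt (lines : List String) (keep : Int) (deck_length : Int) : Int :=
  match lines with
  | [] => keep
  | line :: rest =>
    let pos := reverse_shuffle_alt rest keep deck_length
    let tokens := PySem.Str.split₀ line
    if PySem.List.pyGetD tokens 1 "" = "into" then
      deck_length - 1 - pos
    else if PySem.List.pyGetD tokens 1 "" = "with" then
      PySem.Int.mod
        (PySem.Int.powMod ((PySem.Int.ofStr? (PySem.List.pyGetD tokens 3 "")).getD 0)
            (deck_length - 2).toNat deck_length * pos)
        deck_length
    else if PySem.List.pyGetD tokens 0 "" = "cut" then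
      PySem.Int.mod (pos + (PySem.Int.ofStr? (PySem.List.pyGetD tokens 1 "")).getD 0 + deck_length)
        deck_length
    else pos

-- ===== PRECONDITION & SPEC =====
-- a line A processes without raising: non-empty split; 'cut' needs a parseable tokens[1];
-- any other first word needs a tokens[1]; 'with' in second place needs a parseable tokens[3]
def pvLineOK (line : String) : Bool :=
  match PySem.Str.split₀ line with
  | [] => false
  | t0 :: rest =>
    if t0 = "cut" then
      match rest with
      | t1 :: _ => (PySem.Int.ofStr? t1).isSome
      | [] => false
    else
      match rest with
      | [] => false
      | t1 :: rest2 =>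
        if t1 = "with" then
          match rest2 with
          | _ :: t3 :: _ => (PySem.Int.ofStr? t3).isSome
          | _ => false
        else true

-- a line whose second token is 'with' and whose first is not 'cut' (A calls pow on it)
def pvTakesWith (line : String) : Bool :=
  match PySem.Str.split₀ line with
  | t0 :: t1 :: _ => decide (t0 ≠ "cut") && decide (t1 = "with")
  | _ => false

-- a line on which A applies a '%' reduction ('cut …', or '… with …')
def pvTakesMod (line : String) : Bool :=
  match PySem.Str.split₀ line with
  | [] => false
  | t0 :: rest =>
    decide (t0 = "cut") || (match rest with | t1 :: _ => decide (t1 = "with") | [] => false)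

-- Pre_ excludes lines on which A's parsing raises IndexError/ValueError, and non-positive
-- deck lengths (outside the natural domain) where A's arithmetic leaves the exact pattern:
-- '% 0' raises ZeroDivisionError, and pow gets a negative exponent or zero modulus, raising
-- for most increments and computing an extended-gcd inverse otherwise (see claim cites).
def Pre_reverse_shuffle (lines : List String) (keep : Int) (deck_length : Int) : Prop :=
  (∀ line ∈ lines, pvLineOK line = true) ∧
  (1 ≤ deck_length ∨
   (deck_length < 0 ∧ ∀ line ∈ lines, pvTakesWith line = false) ∨
   (deck_length = 0 ∧ ∀ line ∈ lines, pvTakesMod line = false))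
instance (lines : List String) (keep : Int) (deck_length : Int) : Decidable (Pre_reverse_shuffle lines keep deck_length) := by unfold Pre_reverse_shuffle; infer_instance

def pvWitness_reverse_shuffle : List String × Int × Int :=
  (["cut -4", "deal with increment 7", "deal into new stack"], 3, 11)

def Spec_reverse_shuffle (lines : List String) (keep : Int) (deck_length : Int) (out : Int) : Prop := out = reverse_shuffle_alt lines keep deck_length
instance (lines : List String) (keep : Int) (deck_length : Int) (out : Int) : Decidable (Spec_reverse_shuffle lines keep deck_length out) := by unfold Spec_reverse_shuffle; infer_instance

-- ===== CLAIM (what is proved, stated in full; the proofs are below) =====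
def Claim_equal_reverse_shuffle : Prop := ∀ (lines : List String) (keep : Int) (deck_length : Int), Dom_reverse_shuffle lines keep deck_length → Pre_reverse_shuffle lines keep deck_length → Spec_reverse_shuffle lines keep deck_length (reverse_shuffle lines keep deck_length)

-- ===== LEMMAS AND PROOFS =====

theorem pv_getD1 (t0 t1 : String) (r : List String) :
    PySem.List.pyGetD (t0 :: t1 :: r) 1 "" = t1 := by
  simpa using PySem.List.pyGetD_ofNat (t0 :: t1 :: r) 1 "" (by simp)

-- on a line A accepts, B's reordered dispatch computes exactly A's step
theorem pv_step_eq (L y : Int) (l : String) (hok : pvLineOK l = true) :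
    (let tokens := PySem.Str.split₀ l
     if PySem.List.pyGetD tokens 1 "" = "into" then
       L - 1 - y
     else if PySem.List.pyGetD tokens 1 "" = "with" then
       PySem.Int.mod
         (PySem.Int.powMod ((PySem.Int.ofStr? (PySem.List.pyGetD tokens 3 "")).getD 0)
             (L - 2).toNat L * y)
         L
     else if PySem.List.pyGetD tokens 0 "" = "cut" then
       PySem.Int.mod (y + (PySem.Int.ofStr? (PySem.List.pyGetD tokens 1 "")).getD 0 + L) L
     else y) = pvStepA L y l := by
  rcases h : PySem.Str.split₀ l with _ | ⟨t0, rest⟩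
  · simp [pvLineOK, h] at hok
  · rcases rest with _ | ⟨t1, rest2⟩
    · by_cases hc : t0 = "cut" <;> simp [pvLineOK, h, hc] at hok
    · by_cases hi : t1 = "into"
      · have hc : t0 ≠ "cut" := by
          intro hc
          subst hc; subst hi
          rw [pvLineOK, h] at hok
          simp [show PySem.Int.ofStr? "into" = none from by decide] at hok
        simp [pvStepA, h, hc, hi, PySem.List.pyGetD_zero_cons, pv_getD1,
          pv_reverse_deal_into]
      · by_cases hw : t1 = "with"
        · have hc : t0 ≠ "cut" := by
            intro hc
            subst hc; subst hw
            rw [pvLineOK, h] at hok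
            simp [show PySem.Int.ofStr? "with" = none from by decide] at hok
          simp [pvStepA, h, hc, hw, PySem.List.pyGetD_zero_cons, pv_getD1,
            pv_reverse_deal_with, pv_modinv, mul_comm]
        · by_cases hc : t0 = "cut" <;>
            simp [pvStepA, h, hc, hi, hw, PySem.List.pyGetD_zero_cons, pv_getD1,
              pv_reverse_cut, add_comm]
  
theorem pv_fold_eq (L keep : Int) (lines : List String)
    (hok : ∀ l ∈ lines, pvLineOK l = true) :
    lines.reverse.foldl (pvStepA L) keep = reverse_shuffle_alt lines keep L := by
  induction lines with
  | nil => simp [reverse_shuffle_alt]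
  | cons l ls ih =>
    have h1 : (l :: ls).reverse = ls.reverse ++ [l] := by simp
    rw [h1, List.foldl_append, List.foldl_cons, List.foldl_nil,
      ih (fun l' h' => hok l' (by simp [h'])), reverse_shuffle_alt]
    exact (pv_step_eq L _ l (hok l (by simp))).symm

-- ===== VERDICT (by name: the statement is the Claim_ definition above) =====
theorem reverse_shuffle_spec : Claim_equal_reverse_shuffle := by
  intro lines keep L _ hpre
  show reverse_shuffle lines keep L = reverse_shuffle_alt lines keep L
  rw [reverse_shuffle, PySem.List.slice?_none_none_neg_one, Option.getD_some]
  exact pv_fold_eq L keep lines hpre.1
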